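-- pv_equiv track=rewrite | github.com/Burbanit0/Vote-App | flask_voter_app/app/utils/simulation_ranked_utils.py | get_coombs_winner
-- ===== SOURCE A (Python) =====
-- from collections import defaultdict, Counter
--
-- def get_coombs_winner(votes: list) -> str:
--     """
--     Determine the Coombs' method winner from a set of rankings.
--     :param votes: A list of rankings (see get_condorcet_winner for format)
--     :return: The name of the Coombs' winner
--     """
--     # Determine format
--     is_dict_format = isinstance(votes[0], dict) if votes else False
--
--     candidates = set()
--     for vote in votes:
--         if is_dict_format:
--             ranking = vote["ranking"]
--         else:
--             ranking = vote
--         candidates.update(ranking)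
--
--     while len(candidates) > 1:
--         # Count last-choice votes
--         last_choices = Counter()
--         for vote in votes:
--             if is_dict_format:
--                 ranking = vote["ranking"]
--             else:
--                 ranking = vote
--
--             # Find the lowest-ranked remaining candidate
--             for candidate in reversed(ranking):
--                 if candidate in candidates:
--                     last_choices[candidate] += 1
--                     break
--
--         # Eliminate candidate(s) with most last-place votes
--         max_last_choices = max(last_choices.values())
--         eliminated = [c for c, v in last_choices.items() if v == max_last_choices]
--
--         # If tie for elimination, eliminate all tied candidates
--         for candidate in eliminated:
--             candidates.remove(candidate)
--
--     return candidates.pop()  # Return the last remaining candidate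
-- ===== SOURCE B (Python) =====
-- from collections import deque
--
--
-- def get_coombs_winner(votes: list) -> str:
--     """
--     Determine the Coombs' method winner, eliminating one pass at a time but
--     scanning each ballot incrementally: every ballot keeps a deque of its
--     ranking reversed, and eliminated candidates are popped from its front
--     once and for all instead of being re-skipped every round.
--     """
--     is_dict_format = isinstance(votes[0], dict) if votes else False
--     rankings = [vote["ranking"] if is_dict_format else vote for vote in votes]
--
--     candidates = set()
--     for ranking in rankings:
--         candidates.update(ranking)
--
--     # front of each deque = current lowest-ranked not-yet-eliminated candidate
--     ballots = [deque(reversed(ranking)) for ranking in rankings]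
--
--     while len(candidates) > 1:
--         counts = {}
--         for ballot in ballots:
--             while ballot and ballot[0] not in candidates:
--                 ballot.popleft()
--             if ballot:
--                 c = ballot[0]
--                 counts[c] = counts.get(c, 0) + 1
--         m = max(counts.values())
--         candidates = {c for c in candidates if counts.get(c, 0) < m}
--
--     return candidates.pop()
-- ===== Notes on version B (the rewrite author's own statement) =====
-- stated objective: alternative
-- what changed: Instead of re-scanning every full ballot from its end in every elimination round, B keeps per-ballot deques of the reversed ranking and pops eliminated candidates from the front once and for all, so each ballot entry is skipped at most once over the whole run; eliminated candidates are dropped by one set comprehension over the counts instead of Counter-item scans plus per-candidate removals.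
import Mathlib
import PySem

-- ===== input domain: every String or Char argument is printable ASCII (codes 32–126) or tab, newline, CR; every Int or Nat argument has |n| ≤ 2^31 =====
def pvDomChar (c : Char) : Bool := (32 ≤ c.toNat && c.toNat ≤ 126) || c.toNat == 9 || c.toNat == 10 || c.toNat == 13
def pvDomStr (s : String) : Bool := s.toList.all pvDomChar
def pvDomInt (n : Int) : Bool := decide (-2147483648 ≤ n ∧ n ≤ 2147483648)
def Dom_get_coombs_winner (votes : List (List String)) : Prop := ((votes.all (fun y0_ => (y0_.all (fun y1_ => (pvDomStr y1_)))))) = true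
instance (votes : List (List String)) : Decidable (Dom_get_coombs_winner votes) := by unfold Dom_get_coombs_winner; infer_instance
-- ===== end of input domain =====

-- B replaces A's per-round re-scan of every full ballot from its end by per-ballot deques of the
-- reversed ranking whose eliminated front entries are popped once and for all, so each ballot
-- entry is skipped at most once over the whole run (objective: alternative).

-- ===== PORT A =====
-- A's inner loop: "for candidate in reversed(ranking): if candidate in candidates: …; break"
def pvLastA (cands : PySem.Set String) : List String → Option String
  | [] => none
  | c :: rest => if PySem.Set.contains cands c then some c else pvLastA cands rest

-- "last_choices = Counter(); for vote in votes: … last_choices[candidate] += 1"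
def pvCountsA (cands : PySem.Set String) (votes : List (List String)) : PySem.Dict String Int :=
  votes.foldl (fun d vote =>
    match pvLastA cands vote.reverse with
    | some c => d.modify c 0 (· + 1)
    | none => d) PySem.Dict.empty

-- the while-loop; fuel = number of candidates always suffices (every round removes at least one).
-- max(last_choices.values()) → max?; the none branch is Python's ValueError on an empty counter,
-- unreachable from get_coombs_winner's initial state.  candidates.remove(c) is ported as discard:
-- the removed key is always present (it came out of a membership test against candidates).
def pvLoopA (votes : List (List String)) : Nat → PySem.Set String → PySem.Set String
  | 0, cands => cands
  | fuel + 1, cands =>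
    if cands.length ≤ 1 then cands
    else
      let lc := pvCountsA cands votes
      match PySem.List.max? lc.values (fun v => v) with
      | none => cands
      | some m =>
          let eliminated := (lc.items.filter (fun p => p.2 == m)).map Prod.fst
          pvLoopA votes fuel (eliminated.foldl (fun s c => PySem.Set.discard s c) cands)

-- under the type List (List String), votes[0] is never a dict, so ranking = vote throughout.
-- candidates.pop() on the final singleton → headD ""; "" arises only where Python raises KeyError
-- on the empty set (excluded by Pre_).
def get_coombs_winner (votes : List (List String)) : String :=
  let candidates : PySem.Set String :=
    votes.foldl (fun s vote => PySem.Set.update s vote) PySem.Set.empty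
  (pvLoopA votes candidates.length candidates).headD ""

-- ===== PORT B =====
-- "while ballot and ballot[0] not in candidates: ballot.popleft()" (deque as a list, front = head)
def pvAdvance (cands : PySem.Set String) : List String → List String
  | [] => []
  | c :: rest => if PySem.Set.contains cands c then c :: rest else pvAdvance cands rest

-- one counting pass: advance every ballot, count its front, keep the advanced deques
def pvRoundB (cands : PySem.Set String) (ballots : List (List String)) :
    PySem.Dict String Int × List (List String) :=
  ballots.foldl (fun st b =>
    let b' := pvAdvance cands b
    (match b' with
     | [] => st.1
     | c :: _ => st.1.insert c (st.1.getD c 0 + 1), st.2 ++ [b']))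
    (PySem.Dict.empty, [])

-- B's while-loop; same fuel bound, same unreachable none branch as in A's port.
def pvLoopB : Nat → PySem.Set String → List (List String) → PySem.Set String
  | 0, cands, _ => cands
  | fuel + 1, cands, ballots =>
    if cands.length ≤ 1 then cands
    else
      let r := pvRoundB cands ballots
      match PySem.List.max? r.1.values (fun v => v) with
      | none => cands
      | some m => pvLoopB fuel (cands.filter (fun c => decide (r.1.getD c 0 < m))) r.2

def get_coombs_winner_alt (votes : List (List String)) : String :=
  let candidates : PySem.Set String :=
    votes.foldl (fun s vote => PySem.Set.update s vote) PySem.Set.empty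
  let ballots := votes.map List.reverse
  (pvLoopB candidates.length candidates ballots).headD ""

-- ===== PRECONDITION & SPEC =====
-- Pre_ excludes exactly the inputs on which A raises: KeyError from candidates.pop() when the
-- elimination ends with NO candidate (the last round ties all remaining candidates for most
-- last-place votes, or votes contains no candidate at all).  Whether that happens is inherently a
-- property of the elimination process, so Pre_ states it with the minimal reference recursion
-- below (independent of both ports): count last places, drop the maximal ones, repeat.  The two
-- ports happen to agree even at those excluded points (both yield "" where Python raises), so the
-- equivalence proof below does not consume Pre_; Pre_ is there to delimit A's raising inputs.
def pvElimRef (votes : List (List String)) : Nat → List String → List String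
  | 0, cs => cs
  | fuel + 1, cs =>
    if cs.length ≤ 1 then cs
    else
      let count : String → Nat := fun c =>
        (votes.filter (fun v => (v.filter (fun x => decide (x ∈ cs))).getLast? = some c)).length
      match (cs.map count).max? with
      | none => cs
      | some m => pvElimRef votes fuel (cs.filter (fun c => decide (count c < m)))

def Pre_get_coombs_winner (votes : List (List String)) : Prop :=
  (pvElimRef votes (PySem.List.dedup votes.flatten).length (PySem.List.dedup votes.flatten)).length = 1
instance (votes : List (List String)) : Decidable (Pre_get_coombs_winner votes) := by
  unfold Pre_get_coombs_winner; infer_instance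

def pvWitness_get_coombs_winner : List (List String) := [["a", "b"], ["a", "b"], ["b", "a"]]

def Spec_get_coombs_winner (votes : List (List String)) (out : String) : Prop := out = get_coombs_winner_alt votes
instance (votes : List (List String)) (out : String) : Decidable (Spec_get_coombs_winner votes out) := by unfold Spec_get_coombs_winner; infer_instance

-- ===== CLAIM (what is proved, stated in full; the proofs are below) =====
def Claim_equal_get_coombs_winner : Prop := ∀ (votes : List (List String)), Dom_get_coombs_winner votes → Pre_get_coombs_winner votes → Spec_get_coombs_winner votes (get_coombs_winner votes)

-- ===== LEMMAS AND PROOFS =====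

-- advancing past a smaller candidate set subsumes an earlier advance past a larger one
lemma pv_advance_advance (c1 c2 : PySem.Set String)
    (h : ∀ x, x ∈ c2 → x ∈ c1)
    (l : List String) : pvAdvance c2 (pvAdvance c1 l) = pvAdvance c2 l := by
  induction l with
  | nil => rfl
  | cons c rest ih =>
    by_cases h1 : c ∈ c1
    · simp [pvAdvance, h1]
    · have h2 : c ∉ c2 := fun hc => h1 (h c hc)
      simp [pvAdvance, h1, h2, ih]

-- A's reversed scan finds exactly the head of the advanced ballot
lemma pv_lastA_eq_head_advance (cands : PySem.Set String) (l : List String) :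
    pvLastA cands l = (pvAdvance cands l).head? := by
  induction l with
  | nil => rfl
  | cons c rest ih =>
    by_cases hc : c ∈ cands
    · simp [pvLastA, pvAdvance, hc]
    · simp [pvLastA, pvAdvance, hc, ih]

-- reshaping an option-guarded counting fold into a fold over the present values
lemma pv_foldl_option_modify {α : Type} (f : α → Option String) (l : List α)
    (d : PySem.Dict String Int) :
    l.foldl (fun d a => match f a with
      | some c => d.modify c 0 (· + 1)
      | none => d) d
      = ((l.map f).filterMap id).foldl (fun d c => d.modify c 0 (· + 1)) d := by
  induction l generalizing d with
  | nil => rfl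
  | cons a t ih =>
    cases hfa : f a <;> simp [List.foldl_cons, hfa, ih]

lemma pv_foldl_option_insert {α : Type} (f : α → Option String) (l : List α)
    (d : PySem.Dict String Int) :
    l.foldl (fun d a => match f a with
      | some c => d.insert c (d.getD c 0 + 1)
      | none => d) d
      = ((l.map f).filterMap id).foldl (fun d c => d.insert c (d.getD c 0 + 1)) d := by
  induction l generalizing d with
  | nil => rfl
  | cons a t ih =>
    cases hfa : f a <;> simp [List.foldl_cons, hfa, ih]

lemma pv_countsA_eq_counter (cands : PySem.Set String) (votes : List (List String)) :
    pvCountsA cands votes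
      = PySem.Dict.counter ((votes.map (fun v => pvLastA cands v.reverse)).filterMap id) := by
  rw [PySem.Dict.counter_eq_foldl, pvCountsA,
    pv_foldl_option_modify (fun v => pvLastA cands v.reverse) votes PySem.Dict.empty]

lemma pv_roundB_foldl (cands : PySem.Set String) (bs : List (List String))
    (d : PySem.Dict String Int) (acc : List (List String)) :
    bs.foldl (fun st b =>
      let b' := pvAdvance cands b
      (match b' with
       | [] => st.1
       | c :: _ => st.1.insert c (st.1.getD c 0 + 1), st.2 ++ [b'])) (d, acc)
      = (bs.foldl (fun d b =>
          match pvAdvance cands b with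
          | [] => d
          | c :: _ => d.insert c (d.getD c 0 + 1)) d,
         acc ++ bs.map (fun b => pvAdvance cands b)) := by
  induction bs generalizing d acc with
  | nil => simp
  | cons b t ih => simp [List.foldl_cons, ih]

lemma pv_roundB_eq (cands : PySem.Set String) (ballots : List (List String)) :
    pvRoundB cands ballots
      = (PySem.Dict.counter ((ballots.map (fun b => pvAdvance cands b)).filterMap List.head?),
         ballots.map (fun b => pvAdvance cands b)) := by
  unfold pvRoundB
  rw [pv_roundB_foldl]
  simp only [List.nil_append]
  congr 1
  have hfun : (fun (d : PySem.Dict String Int) (b : List String) =>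
      match pvAdvance cands b with
      | [] => d
      | c :: _ => d.insert c (d.getD c 0 + 1))
      = fun (d : PySem.Dict String Int) (b : List String) =>
          match (pvAdvance cands b).head? with
          | some c => d.insert c (d.getD c 0 + 1)
          | none => d := by
    funext d b; cases pvAdvance cands b <;> rfl
  rw [hfun, pv_foldl_option_insert (fun b => (pvAdvance cands b).head?) ballots PySem.Dict.empty]
  have hlist : (ballots.map (fun b => (pvAdvance cands b).head?)).filterMap id
      = (ballots.map (fun b => pvAdvance cands b)).filterMap List.head? := by
    rw [List.filterMap_map, List.filterMap_map]; rfl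
  rw [hlist, PySem.Dict.foldl_insert_getD_add_one_eq_counter]

-- eliminating the counter's maximal keys from a set = keeping members with count below the max
lemma pv_foldl_discard (E : List String) (s : PySem.Set String) :
    E.foldl (fun s c => PySem.Set.discard s c) s = s.filter (fun x => !(E.contains x)) := by
  induction E generalizing s with
  | nil => simp
  | cons c t ih =>
    rw [List.foldl_cons, ih (PySem.Set.discard s c)]
    simp only [PySem.Set.discard, List.filter_filter]
    apply List.filter_congr
    intro x _
    by_cases hx : x = c <;> simp [hx, Bool.and_comm]

lemma pv_step_sets_eq (L : List String) (m : Int)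
    (hm : PySem.List.max? (PySem.Dict.counter L).values (fun v => v) = some m)
    (cands : PySem.Set String) :
    (((PySem.Dict.counter L).items.filter (fun p => p.2 == m)).map Prod.fst).foldl
        (fun s c => PySem.Set.discard s c) cands
      = cands.filter (fun c => decide ((PySem.Dict.counter L).getD c 0 < m)) := by
  rw [pv_foldl_discard]
  have hitems : (PySem.Dict.counter L).items
      = (PySem.Set.ofList L).map (fun k => (k, (L.count k : Int))) := PySem.Dict.items_counter L
  have hgen : ∀ (l : List String),
      ((l.map (fun k => (k, (L.count k : Int)))).filter (fun p => p.2 == m)).map Prod.fst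
        = l.filter (fun k => (L.count k : Int) == m) := by
    intro l
    induction l with
    | nil => rfl
    | cons a t ih => cases hb : ((List.count a L : Int) == m) <;> simp [hb, ih]
  have helim : ((PySem.Dict.counter L).items.filter (fun p => p.2 == m)).map Prod.fst
      = (PySem.Set.ofList L).filter (fun k => (L.count k : Int) == m) := by
    rw [hitems, hgen]
  have hmem : m ∈ (PySem.Dict.counter L).values := PySem.List.max?_mem hm
  have hvals : (PySem.Dict.counter L).values
      = (PySem.Set.ofList L).map (fun k => (L.count k : Int)) := by
    show (PySem.Dict.counter L).items.map Prod.snd = _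
    rw [hitems, List.map_map]; rfl
  have hmpos : 0 < m := by
    rw [hvals] at hmem
    obtain ⟨k, hk, hkm⟩ := List.mem_map.mp hmem
    have : k ∈ L := (PySem.Set.mem_ofList L k).mp hk
    have := List.count_pos_iff.mpr this
    omega
  have hmax : ∀ x ∈ L, (L.count x : Int) ≤ m := by
    intro x hx
    have hv : (L.count x : Int) ∈ (PySem.Dict.counter L).values := by
      rw [hvals]
      exact List.mem_map.mpr ⟨x, (PySem.Set.mem_ofList L x).mpr hx, rfl⟩
    exact PySem.List.max?_isMax hm _ hv
  apply List.filter_congr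
  intro x _
  rw [helim, PySem.Dict.getD_counter]
  by_cases hx : x ∈ L
  · by_cases heq : (L.count x : Int) = m
    · have hmem2 : x ∈ (PySem.Set.ofList L).filter (fun k => (L.count k : Int) == m) :=
        List.mem_filter.mpr ⟨(PySem.Set.mem_ofList L x).mpr hx, by simp [heq]⟩
      simp [hmem2, heq]
    · have hlt : (L.count x : Int) < m := lt_of_le_of_ne (hmax x hx) heq
      have hnot : x ∉ (PySem.Set.ofList L).filter (fun k => (L.count k : Int) == m) := by
        intro hmem2
        exact heq (by simpa using (List.mem_filter.mp hmem2).2)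
      simp [hnot, hlt]
  · have hc0 : L.count x = 0 := List.count_eq_zero.mpr hx
    have hnot : x ∉ (PySem.Set.ofList L).filter (fun k => (L.count k : Int) == m) := by
      intro hmem2
      exact hx ((PySem.Set.mem_ofList L x).mp (List.mem_filter.mp hmem2).1)
    simp [hnot, hc0, hmpos]

-- the two while-loops agree whenever the stored deques advance like the full reversed ballots
lemma pv_loop_eq (fuel : Nat) (votes : List (List String)) (cands : PySem.Set String)
    (ballots : List (List String))
    (h : ballots.map (fun b => pvAdvance cands b)
          = votes.map (fun v => pvAdvance cands v.reverse)) :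
    pvLoopA votes fuel cands = pvLoopB fuel cands ballots := by
  induction fuel generalizing cands ballots with
  | zero => rfl
  | succ fuel ih =>
    by_cases hlen : cands.length ≤ 1
    · simp [pvLoopA, pvLoopB, hlen]
    · have hL : (ballots.map (fun b => pvAdvance cands b)).filterMap List.head?
          = (votes.map (fun v => pvLastA cands v.reverse)).filterMap id := by
        rw [h, List.filterMap_map, List.filterMap_map]
        apply List.filterMap_congr
        intro v _
        simp [Function.comp, pv_lastA_eq_head_advance]
      have hc : pvCountsA cands votes
          = PySem.Dict.counter ((votes.map (fun v => pvLastA cands v.reverse)).filterMap id) :=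
        pv_countsA_eq_counter cands votes
      have hr : pvRoundB cands ballots
          = (PySem.Dict.counter ((votes.map (fun v => pvLastA cands v.reverse)).filterMap id),
             ballots.map (fun b => pvAdvance cands b)) := by
        rw [pv_roundB_eq, hL]
      simp only [pvLoopA, pvLoopB, if_neg hlen, hc, hr]
      cases hmax : PySem.List.max?
          (PySem.Dict.counter ((votes.map (fun v => pvLastA cands v.reverse)).filterMap id)).values
          (fun v => v) with
      | none => rfl
      | some m =>
        dsimp only
        rw [pv_step_sets_eq _ m hmax cands]
        apply ih
        have hsub : ∀ x,
            x ∈ cands.filter (fun c => decide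
              ((PySem.Dict.counter ((votes.map (fun v => pvLastA cands v.reverse)).filterMap id)).getD c 0 < m)) →
            x ∈ cands := fun x hx => List.mem_of_mem_filter hx
        calc (ballots.map (fun b => pvAdvance cands b)).map (fun b => pvAdvance _ b)
            = (votes.map (fun v => pvAdvance cands v.reverse)).map (fun b => pvAdvance _ b) := by rw [h]
          _ = votes.map (fun v => pvAdvance _ (pvAdvance cands v.reverse)) := by
              rw [List.map_map]; rfl
          _ = votes.map (fun v => pvAdvance _ v.reverse) := by
              apply List.map_congr_left
              intro v _
              exact pv_advance_advance cands _ hsub v.reverse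

-- ===== VERDICT (by name: the statement is the Claim_ definition above) =====
theorem get_coombs_winner_spec : Claim_equal_get_coombs_winner := by
  intro votes _ _
  unfold Spec_get_coombs_winner get_coombs_winner get_coombs_winner_alt
  exact congrArg (fun l => List.headD l "")
    (pv_loop_eq (votes.foldl (fun s vote => PySem.Set.update s vote) PySem.Set.empty).length votes
      (votes.foldl (fun s vote => PySem.Set.update s vote) PySem.Set.empty)
      (votes.map List.reverse) (by rw [List.map_map]; rfl))
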